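-- pv_equiv track=rewrite | github.com/dannyk1003/2022_python_course | counter3.2.py | is_formula
-- ===== SOURCE A (Python) =====
-- def operator_counter(formula):
--     '''
--     判斷哪幾個是運算元;
--     x = formula;
--     return = list[ ]
--     '''
--     op_counter = []
--     for i, formula_element in enumerate(list(formula)):
--         #enumerate 將內容編號 [(0, "A"), (1, "B"), (2, "C")...]
--         if is_operator(formula_element):
--             op_counter.append(i)
--     return op_counter
--
-- def is_operator(formula_element):
--     '''
--     判斷是否為運算元
--     '''
--     operator_element = ["+", "-", "*", "/", "(", ")"]
--     for i in list(formula_element):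
--         if i not in operator_element: # formula中存在非formula_element元素
--             return False
--     return True
--
-- def is_formula(formula):
--     '''
--     判斷是否為算式
--     '''
--     formula_element = ["1", "2", "3", "4", "5", "6", "7", "8", "9", "0", "+", "-", "*", "/", "(", ")"]
--     for i in list(formula):
--         if i not in formula_element: # formula中存在非formula_element元素
--             return False
--     if not parentheses_count(formula): # 左右括號數量是否相同
--         return False
--     if not is_operator_double(formula): # formula 有相鄰運算元
--         return False
--     return True
--
-- def is_operator_double(formula): #[3,6]
--     '''
--     判斷是否有連續的運算元
--     '''
--     op_counter = operator_counter(formula)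
--     op_list = operator_list(formula)
--     for i in range(len(op_counter)-1):
--         if op_counter[i+1] - op_counter[i] == 1: # 運算原相鄰
--             if op_list[i] in ["+", "-", "*", "/"]:
--                 if op_list[i+1] != "(":
--                     return False
--             if op_list[i] == "(":
--                 if op_list[i+1] in ["+", "-", "*", "/"]:
--                     return False
--             if op_list[i] == ")":
--                 if op_list[i+1] == "(":
--                     return False
--     return True
--
-- def operator_list(formula): # x = operator_count [3, 6], y = formula
--     '''
--     運算原有哪些(加順序)
--     '''
--     op_counter = operator_counter(formula)
--     op_list = []
--     formula_list = list(formula)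
--     for i in op_counter:
--         op_list.append(formula_list[i])
--     return op_list #["+","+"]
--
-- def parentheses_count(formula):
--     '''
--     計算左右括弧數量是否一致
--     '''
--     op_list = operator_list(formula)
--     left_count = op_list.count("(")
--     right_count = op_list.count(")")
--     if left_count == right_count:
--         return True
--     else:
--         return False
-- ===== SOURCE B (Python) =====
-- ARITH = set("+-*/")
-- OPS = set("+-*/()")
-- DIGITS = set("0123456789")
--
-- def is_formula(formula):
--     '''Single pass: check allowed chars, adjacent-operator rules via the
--     previous character, and count parentheses as we go.'''
--     left = right = 0
--     prev = None
--     for c in formula: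
--         if c not in DIGITS and c not in OPS:
--             return False
--         if prev is not None and prev in OPS and c in OPS:
--             if prev in ARITH and c != '(':
--                 return False
--             if prev == '(' and c in ARITH:
--                 return False
--             if prev == ')' and c == '(':
--                 return False
--         if c == '(':
--             left += 1
--         elif c == ')':
--             right += 1
--         prev = c
--     return left == right
-- ===== Notes on version B (the rewrite author's own statement) =====
-- stated objective: faster
-- what changed: Replaced the five helper passes that build index and operator lists (operator_counter called three times, plus operator_list and count scans) by one single left-to-right pass keeping only the previous character and two parenthesis counters.
import Mathlib
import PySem

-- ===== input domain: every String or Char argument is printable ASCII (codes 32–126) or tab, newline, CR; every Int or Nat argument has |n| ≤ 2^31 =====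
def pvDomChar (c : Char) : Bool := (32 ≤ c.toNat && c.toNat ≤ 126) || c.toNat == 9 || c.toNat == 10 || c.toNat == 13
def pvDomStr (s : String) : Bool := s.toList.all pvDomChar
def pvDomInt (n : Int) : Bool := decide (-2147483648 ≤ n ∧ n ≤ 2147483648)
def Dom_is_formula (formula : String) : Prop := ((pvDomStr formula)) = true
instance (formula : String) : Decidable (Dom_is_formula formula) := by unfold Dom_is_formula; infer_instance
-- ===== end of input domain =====

-- B replaces A's five helper passes (index/operator lists rebuilt and rescanned) by one
-- left-to-right pass keeping the previous character and two parenthesis counters.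

-- ===== PORT A =====
def pvOpsA : List Char := ['+', '-', '*', '/', '(', ')']
def pvArithA : List Char := ['+', '-', '*', '/']
def pvAllowedA : List Char := ['1','2','3','4','5','6','7','8','9','0','+','-','*','/','(',')']

-- 'for i in list(formula_element)': formula_element is one character, the loop body runs once
def is_operator (formula_element : Char) : Bool :=
  [formula_element].all (fun i => decide (i ∈ pvOpsA))

def operator_counter (formula : String) : List Int :=
  (PySem.List.enumerate formula.toList 0).foldl
    (fun op_counter p => if is_operator p.2 then op_counter ++ [p.1] else op_counter) []

-- formula_list[i]: the indices come from enumerate, so they are always in range; pyGetD is exact here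
def operator_list (formula : String) : List Char :=
  (operator_counter formula).foldl
    (fun op_list i => op_list ++ [PySem.List.pyGetD formula.toList i ' ']) []

def parentheses_count (formula : String) : Bool :=
  let op_list := operator_list formula
  let left_count := PySem.List.count op_list '('
  let right_count := PySem.List.count op_list ')'
  if left_count = right_count then true else false

-- op_counter[i], op_counter[i+1], op_list[i], op_list[i+1]: i from range(len-1), always in range
def is_operator_double (formula : String) : Bool :=
  let op_counter := operator_counter formula
  let op_list := operator_list formula
  (PySem.List.pyRange 0 ((op_counter.length : Int) - 1) 1).all fun i =>
    if PySem.List.pyGetD op_counter (i + 1) 0 - PySem.List.pyGetD op_counter i 0 = 1 then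
      !((decide (PySem.List.pyGetD op_list i ' ' ∈ pvArithA) &&
           decide (PySem.List.pyGetD op_list (i + 1) ' ' ≠ '(')) ||
        (decide (PySem.List.pyGetD op_list i ' ' = '(') &&
           decide (PySem.List.pyGetD op_list (i + 1) ' ' ∈ pvArithA)) ||
        (decide (PySem.List.pyGetD op_list i ' ' = ')') &&
           decide (PySem.List.pyGetD op_list (i + 1) ' ' = '(')))
    else true

def is_formula (formula : String) : Bool :=
  if !(formula.toList.all (fun i => decide (i ∈ pvAllowedA))) then false
  else if !(parentheses_count formula) then false
  else if !(is_operator_double formula) then false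
  else true

-- ===== PORT B =====
def pvArithB : List Char := ['+', '-', '*', '/']
def pvOpsB : List Char := ['+', '-', '*', '/', '(', ')']
def pvDigitsB : List Char := ['0','1','2','3','4','5','6','7','8','9']

def altBad (p c : Char) : Bool :=
  (decide (p ∈ pvArithB) && decide (c ≠ '(')) ||
  (decide (p = '(') && decide (c ∈ pvArithB)) ||
  (decide (p = ')') && decide (c = '('))

def altLoop : Option Char → Int → Int → List Char → Bool
  | _, left, right, [] => decide (left = right)
  | prev, left, right, c :: rest =>
    if !(decide (c ∈ pvDigitsB) || decide (c ∈ pvOpsB)) then false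
    else if (match prev with
             | some p => decide (p ∈ pvOpsB) && decide (c ∈ pvOpsB) && altBad p c
             | none => false) then false
    else altLoop (some c)
      (if c = '(' then left + 1 else left)
      (if c = '(' then right else if c = ')' then right + 1 else right) rest

def is_formula_alt (formula : String) : Bool := altLoop none 0 0 formula.toList

-- ===== PRECONDITION & SPEC =====
def Spec_is_formula (formula : String) (out : Bool) : Prop := out = is_formula_alt formula
instance (formula : String) (out : Bool) : Decidable (Spec_is_formula formula out) := by unfold Spec_is_formula; infer_instance

-- ===== CLAIM (what is proved, stated in full; the proofs are below) =====
def Claim_equal_is_formula : Prop := ∀ (formula : String), Dom_is_formula formula → Spec_is_formula formula (is_formula formula)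

-- ===== LEMMAS AND PROOFS =====

-- good-pair test as A writes it (inline in is_operator_double); defeq to !altBad x y
def okp (x y : Char) : Bool :=
  !((decide (x ∈ pvArithA) && decide (y ≠ '(')) ||
    (decide (x = '(') && decide (y ∈ pvArithA)) ||
    (decide (x = ')') && decide (y = '(')))

-- A's adjacency check, on the filtered (index, operator) list
def pairsAdj : List (Int × Char) → Bool
  | (i, x) :: (j, y) :: rest => (if j - i = 1 then okp x y else true) && pairsAdj ((j, y) :: rest)
  | _ => true

-- the same condition, stated on adjacent characters of the whole string
def chainA : List Char → Bool
  | x :: y :: rest => (if is_operator x && is_operator y then okp x y else true) && chainA (y :: rest)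
  | _ => true

-- B's adjacency condition, carrying the previous character
def chainOk : Option Char → List Char → Bool
  | _, [] => true
  | prev, c :: rest =>
    (match prev with
     | some p => !(decide (p ∈ pvOpsB) && decide (c ∈ pvOpsB) && altBad p c)
     | none => true) && chainOk (some c) rest

def Fops (cs : List Char) (s : Int) : List (Int × Char) :=
  (PySem.List.enumerate cs s).filter (fun p => is_operator p.2)

lemma is_operator_eq (c : Char) : is_operator c = decide (c ∈ pvOpsA) := by
  simp [is_operator]

lemma opc_eq (formula : String) :
    operator_counter formula = (Fops formula.toList 0).map (·.1) := by
  simp [operator_counter, Fops, PySem.List.foldl_append_if]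

lemma opl_eq (formula : String) :
    operator_list formula = (Fops formula.toList 0).map (·.2) := by
  rw [operator_list, opc_eq, PySem.List.foldl_append_singleton_eq_map, List.map_map,
    List.nil_append]
  apply List.map_congr_left
  intro p hp
  have hp' : p ∈ PySem.List.enumerate formula.toList 0 := List.mem_of_mem_filter hp
  rw [PySem.List.mem_enumerate_iff] at hp'
  obtain ⟨k, hk, rfl⟩ := hp'
  simp [PySem.List.pyGetD_natCast, List.getD_eq_getElem?_getD, List.getElem?_eq_getElem hk]

lemma map_snd_Fops (cs : List Char) : ∀ s : Int, (Fops cs s).map (·.2) = cs.filter is_operator := by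
  induction cs with
  | nil => intro s; simp [Fops, PySem.List.enumerate_nil]
  | cons c rest ih =>
    intro s
    by_cases hc : is_operator c = true
    · have hF : Fops (c :: rest) s = (s, c) :: Fops rest (s + 1) := by
        simp [Fops, PySem.List.enumerate_cons, hc]
      rw [hF, List.map_cons, ih (s + 1), List.filter_cons]
      simp [hc]
    · have hF : Fops (c :: rest) s = Fops rest (s + 1) := by
        simp [Fops, PySem.List.enumerate_cons, hc]
      rw [hF, ih (s + 1), List.filter_cons]
      simp [hc]

lemma count_filter_op (cs : List Char) (c : Char) (hc : is_operator c = true) :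
    (cs.filter is_operator).count c = cs.count c := by
  induction cs with
  | nil => rfl
  | cons d tl ih =>
    by_cases hd : is_operator d = true
    · simp [hd, List.count_cons, ih]
    · have hne : ¬(d = c) := by intro h; rw [h] at hd; exact hd hc
      simp [hd, ih, hne]

lemma count_map_snd_Fops (cs : List Char) (c : Char) (hc : is_operator c = true) :
    ((Fops cs 0).map (·.2)).count c = cs.count c := by
  rw [map_snd_Fops cs 0, count_filter_op cs c hc]

lemma par_eq (formula : String) :
    parentheses_count formula
      = decide (formula.toList.count '(' = formula.toList.count ')') := by
  simp only [parentheses_count, PySem.List.count_eq, opl_eq]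
  rw [count_map_snd_Fops _ _ (by decide), count_map_snd_Fops _ _ (by decide)]
  split_ifs with h <;> simp [h]

lemma pyGetD_cons_cons_one {α : Type} (a b : α) (l : List α) (d : α) :
    PySem.List.pyGetD (a :: b :: l) 1 d = b := by
  rw [show (1 : Int) = ((1 : Nat) : Int) by norm_num, PySem.List.pyGetD_natCast]
  simp

lemma range_all_adj (L : List (Int × Char)) :
    ((PySem.List.pyRange 0 ((L.length : Int) - 1) 1).all fun i =>
      if PySem.List.pyGetD (L.map (·.1)) (i + 1) 0 - PySem.List.pyGetD (L.map (·.1)) i 0 = 1 then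
        okp (PySem.List.pyGetD (L.map (·.2)) i ' ') (PySem.List.pyGetD (L.map (·.2)) (i + 1) ' ')
      else true) = pairsAdj L := by
  induction L with
  | nil => rw [PySem.List.pyRange_one_eq_nil (by norm_num)]; rfl
  | cons p L ih =>
    obtain ⟨i, x⟩ := p
    cases L with
    | nil => rw [PySem.List.pyRange_one_eq_nil (by norm_num)]; rfl
    | cons q tl =>
      obtain ⟨j, y⟩ := q
      have hb : ((((i, x) :: (j, y) :: tl : List (Int × Char)).length : Int) - 1)
          = (tl.length : Int) + 1 := by simp
      have hb' : ((((j, y) :: tl : List (Int × Char)).length : Int) - 1)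
          = (tl.length : Int) := by simp
      rw [hb] at *
      rw [hb'] at ih
      rw [PySem.List.pyRange_one_cons (by positivity), List.all_cons]
      rw [show pairsAdj ((i, x) :: (j, y) :: tl)
            = ((if j - i = 1 then okp x y else true) && pairsAdj ((j, y) :: tl)) from rfl]
      simp only [zero_add]
      congr 1
      · simp [PySem.List.pyGetD_zero_cons, pyGetD_cons_cons_one]
      · rw [← ih, PySem.List.pyRange_one, PySem.List.pyRange_one]
        have ht : ((tl.length : Int) + 1 - 1).toNat = tl.length := by omega
        have ht' : ((tl.length : Int) - 0).toNat = tl.length := by omega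
        rw [ht, ht', List.all_map, List.all_map]
        congr 1
        funext k
        have e1 : (1 : Int) + (k : Int) = ((k + 1 : Nat) : Int) := by push_cast; ring
        have e3 : ∀ m : Nat, ((m : Int) + 1) = ((m + 1 : Nat) : Int) := by
          intro m; push_cast; ring
        simp only [Function.comp_apply, zero_add, e1]
        simp only [e3]
        simp only [List.map_cons, PySem.List.pyGetD_natCast, List.getD_cons_succ]
        try rfl

lemma mem_Fops_ge (cs : List Char) (s : Int) :
    ∀ p ∈ Fops cs s, s ≤ p.1 := by
  intro p hp
  have hp' : p ∈ PySem.List.enumerate cs s := List.mem_of_mem_filter hp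
  rw [PySem.List.mem_enumerate_iff] at hp'
  obtain ⟨k, hk, rfl⟩ := hp'
  simp

lemma pairsAdj_skip (M : List (Int × Char)) (i : Int) (x : Char)
    (hM : ∀ q ∈ M, i + 2 ≤ q.1) : pairsAdj ((i, x) :: M) = pairsAdj M := by
  cases M with
  | nil => rfl
  | cons q tl =>
    obtain ⟨j, y⟩ := q
    have hj : ¬(j - i = 1) := by have := hM (j, y) (List.mem_cons_self ..); simp at this; omega
    simp [pairsAdj, hj]

lemma chainA_cons_notOp (c : Char) (rest : List Char) (h : is_operator c = false) :
    chainA (c :: rest) = chainA rest := by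
  cases rest with
  | nil => rfl
  | cons d tl => simp [chainA, h]

lemma pairsAdj_Fops (cs : List Char) : ∀ s : Int, pairsAdj (Fops cs s) = chainA cs := by
  induction cs with
  | nil => intro s; simp [Fops, PySem.List.enumerate_nil, pairsAdj, chainA]
  | cons c rest ih =>
    intro s
    by_cases hc : is_operator c = true
    · have hF : Fops (c :: rest) s = (s, c) :: Fops rest (s + 1) := by
        simp [Fops, PySem.List.enumerate_cons, hc]
      rw [hF]
      cases rest with
      | nil => simp [Fops, PySem.List.enumerate_nil, pairsAdj, chainA]
      | cons d rest' =>
        by_cases hd : is_operator d = true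
        · have hF2 : Fops (d :: rest') (s + 1) = (s + 1, d) :: Fops rest' (s + 1 + 1) := by
            simp [Fops, PySem.List.enumerate_cons, hd]
          rw [hF2]
          show ((if s + 1 - s = 1 then okp c d else true) &&
            pairsAdj ((s + 1, d) :: Fops rest' (s + 1 + 1))) = chainA (c :: d :: rest')
          rw [← hF2, ih (s + 1)]
          have h1 : s + 1 - s = 1 := by omega
          simp [h1, chainA, hc, hd]
        · have hF2 : Fops (d :: rest') (s + 1) = Fops rest' (s + 1 + 1) := by
            simp [Fops, PySem.List.enumerate_cons, hd]
          rw [hF2, pairsAdj_skip _ s c ?ge, ← hF2, ih (s + 1)]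
          · cases rest' with
            | nil => simp [chainA, hd]
            | cons e tl => simp [chainA, hd]
          case ge =>
            intro q hq
            have := mem_Fops_ge rest' (s + 1 + 1) q hq
            omega
    · have hF : Fops (c :: rest) s = Fops rest (s + 1) := by
        simp [Fops, PySem.List.enumerate_cons, hc]
      rw [hF, ih (s + 1), chainA_cons_notOp c rest (by simpa using hc)]

lemma dbl_eq (formula : String) :
    is_operator_double formula = chainA formula.toList := by
  simp only [is_operator_double, opc_eq, opl_eq, List.length_map]
  exact (range_all_adj (Fops formula.toList 0)).trans (pairsAdj_Fops formula.toList 0)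

lemma okp_eq_not_altBad (x y : Char) : okp x y = !altBad x y := rfl

lemma chainA_eq_chainOk_some (cs : List Char) :
    ∀ p : Char, chainA (p :: cs) = chainOk (some p) cs := by
  induction cs with
  | nil => intro p; rfl
  | cons c rest ih =>
    intro p
    have hAB : pvOpsA = pvOpsB := rfl
    simp only [chainA, chainOk, ih c, is_operator_eq, okp_eq_not_altBad, hAB]
    by_cases h1 : p ∈ pvOpsB <;> by_cases h2 : c ∈ pvOpsB <;> simp [h1, h2]

lemma chainA_eq_chainOk (cs : List Char) : chainA cs = chainOk none cs := by
  cases cs with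
  | nil => rfl
  | cons c rest =>
    simp only [chainOk, Bool.true_and]
    exact chainA_eq_chainOk_some rest c

lemma allowed_eq (c : Char) :
    decide (c ∈ pvAllowedA) = (decide (c ∈ pvDigitsB) || decide (c ∈ pvOpsB)) := by
  rw [← Bool.decide_or, decide_eq_decide]
  simp [pvAllowedA, pvDigitsB, pvOpsB]
  tauto

lemma cnt_shift (c : Char) (l r : Int) (rest : List Char) :
    decide ((if c = '(' then l + 1 else l) + (rest.count '(' : Int) =
      (if c = '(' then r else if c = ')' then r + 1 else r) + (rest.count ')' : Int))
    = decide (l + ((c :: rest).count '(' : Int) = r + ((c :: rest).count ')' : Int)) := by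
  by_cases h1 : c = '(' <;> by_cases h2 : c = ')' <;>
    simp [h1, h2] <;> omega

lemma altLoop_eq (cs : List Char) : ∀ (prev : Option Char) (l r : Int),
    altLoop prev l r cs =
      ((cs.all fun c => decide (c ∈ pvDigitsB) || decide (c ∈ pvOpsB)) &&
       chainOk prev cs &&
       decide (l + (cs.count '(' : Int) = r + (cs.count ')' : Int))) := by
  induction cs with
  | nil => intro prev l r; simp [altLoop, chainOk]
  | cons c rest ih =>
    intro prev l r
    by_cases hA : (decide (c ∈ pvDigitsB) || decide (c ∈ pvOpsB)) = true
    · by_cases hM : (match prev with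
        | some p => decide (p ∈ pvOpsB) && decide (c ∈ pvOpsB) && altBad p c
        | none => false) = true
      · cases prev with
        | none => simp at hM
        | some p => simp [altLoop, hA, hM, chainOk]
      · simp only [altLoop, hA, Bool.not_true, Bool.false_eq_true, if_false, hM, ih,
          List.all_cons, chainOk, cnt_shift]
        cases prev with
        | none => simp
        | some p =>
          simp only [Bool.not_eq_true] at hM
          simp [hM]
    · simp only [Bool.not_eq_true] at hA
      simp [altLoop, hA]

lemma A_char (formula : String) :
    is_formula formula =
      ((formula.toList.all fun i => decide (i ∈ pvAllowedA)) &&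
       parentheses_count formula && is_operator_double formula) := by
  rw [is_formula]
  cases h1 : (formula.toList.all fun i => decide (i ∈ pvAllowedA)) <;>
    cases h2 : parentheses_count formula <;>
    cases h3 : is_operator_double formula <;> simp

-- ===== VERDICT (by name: the statement is the Claim_ definition above) =====
theorem is_formula_spec : Claim_equal_is_formula := by
  intro formula _
  unfold Spec_is_formula
  rw [A_char, par_eq, dbl_eq, chainA_eq_chainOk, is_formula_alt, altLoop_eq]
  have hall : (formula.toList.all fun i => decide (i ∈ pvAllowedA))
      = (formula.toList.all fun c => decide (c ∈ pvDigitsB) || decide (c ∈ pvOpsB)) :=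
    congrArg _ (funext allowed_eq)
  have hcnt : decide (formula.toList.count '(' = formula.toList.count ')')
      = decide ((0 : Int) + (formula.toList.count '(' : Int)
          = (0 : Int) + (formula.toList.count ')' : Int)) := by
    rw [decide_eq_decide]; omega
  rw [hall, hcnt, Bool.and_assoc, Bool.and_assoc,
    Bool.and_comm (decide _) (chainOk none formula.toList)]
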